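-- pv_equiv track=rewrite | github.com/harshvr24/GeoTrade | backend/app/ml/pipeline.py | simple_cluster
-- ===== SOURCE A (Python) =====
-- def simple_cluster(headlines: list[str], n_clusters: int = 4) -> list[int]:
--     """Simple clustering based on keyword frequency."""
--     if not headlines:
--         return []
--
--     clusters = []
--     keywords_by_headline = []
--
--     for headline in headlines:
--         words = set(headline.lower().split())
--         keywords_by_headline.append(words)
--
--     cluster_keywords = [
--         {"military", "defense", "naval", "border"},
--         {"sanction", "embargo", "trade"},
--         {"market", "economy", "equities", "price"},
--         {"diplomatic", "talks", "agreement"},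
--     ]
--
--     for keywords in keywords_by_headline:
--         best_cluster = 0
--         best_match = 0
--         for idx, cluster_kw in enumerate(cluster_keywords):
--             matches = len(keywords & cluster_kw)
--             if matches > best_match:
--                 best_cluster = idx
--                 best_match = matches
--         clusters.append(best_cluster)
--
--     return clusters
-- ===== SOURCE B (Python) =====
-- _CLUSTER_KEYWORDS = [
--     ["military", "defense", "naval", "border"],
--     ["sanction", "embargo", "trade"],
--     ["market", "economy", "equities", "price"],
--     ["diplomatic", "talks", "agreement"],
-- ]
--
-- _KW_INDEX = {kw: i for i, kws in enumerate(_CLUSTER_KEYWORDS) for kw in kws}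
--
--
-- def _best_cluster(headline: str) -> int:
--     counts = [0, 0, 0, 0]
--     for word in set(headline.lower().split()):
--         c = _KW_INDEX.get(word)
--         if c is not None:
--             counts[c] += 1
--     return counts.index(max(counts))
--
--
-- def simple_cluster(headlines: list[str], n_clusters: int = 4) -> list[int]:
--     """Simple clustering based on keyword frequency (inverted-index version)."""
--     return [_best_cluster(h) for h in headlines]
-- ===== Notes on version B (the rewrite author's own statement) =====
-- stated objective: idiomatic
-- what changed: B builds one inverted keyword-to-cluster dict once and, per headline, increments a 4-slot count per word and returns counts.index(max(counts)), instead of A's per-headline intersection of the word set with each of the four keyword sets and a running strict-improvement argmax.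
import Mathlib
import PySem

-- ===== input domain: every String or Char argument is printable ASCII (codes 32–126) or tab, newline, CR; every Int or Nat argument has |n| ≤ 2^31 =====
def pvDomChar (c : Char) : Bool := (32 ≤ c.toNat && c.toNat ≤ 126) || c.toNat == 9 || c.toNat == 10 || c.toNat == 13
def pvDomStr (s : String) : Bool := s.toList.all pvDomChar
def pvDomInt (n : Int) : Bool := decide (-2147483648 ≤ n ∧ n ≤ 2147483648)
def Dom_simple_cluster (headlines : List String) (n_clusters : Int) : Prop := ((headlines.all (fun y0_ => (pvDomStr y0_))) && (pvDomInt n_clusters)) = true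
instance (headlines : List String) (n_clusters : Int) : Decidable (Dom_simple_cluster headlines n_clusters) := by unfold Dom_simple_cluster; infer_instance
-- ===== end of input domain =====

-- B replaces A's per-headline scan over every cluster keyword set by one inverted keyword→cluster
-- index plus per-word counting and a first-maximum pick (idiomatic; same tie-breaking as A).

set_option maxHeartbeats 4000000
set_option maxRecDepth 10000

-- ===== PORT A =====
def clustersA : List (PySem.Set String) :=
  [PySem.Set.ofList ["military", "defense", "naval", "border"],
   PySem.Set.ofList ["sanction", "embargo", "trade"],
   PySem.Set.ofList ["market", "economy", "equities", "price"],
   PySem.Set.ofList ["diplomatic", "talks", "agreement"]]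

def simple_cluster (headlines : List String) (n_clusters : Int) : List Int :=
  if headlines = [] then []
  else
    let keywords_by_headline : List (PySem.Set String) :=
      headlines.foldl
        (fun acc headline => acc ++ [PySem.Set.ofList (PySem.Str.split₀ (PySem.Str.lower headline))]) []
    keywords_by_headline.foldl
      (fun clusters keywords =>
        let r := (PySem.List.enumerate clustersA 0).foldl
          (fun (st : Int × Int) e =>
            let m := PySem.Set.len (PySem.Set.inter keywords e.2)
            if m > st.2 then (e.1, m) else st)
          ((0 : Int), (0 : Int))
        clusters ++ [r.1]) []

-- ===== PORT B =====
def clustersB : List (List String) :=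
  [["military", "defense", "naval", "border"],
   ["sanction", "embargo", "trade"],
   ["market", "economy", "equities", "price"],
   ["diplomatic", "talks", "agreement"]]

-- the inverted index {kw: i for i, kws in enumerate(_CLUSTER_KEYWORDS) for kw in kws}
def kwIndex : PySem.Dict String Int :=
  (PySem.List.enumerate clustersB 0).foldl
    (fun d e => e.2.foldl (fun d kw => d.insert kw e.1) d) PySem.Dict.empty

-- loop body of _best_cluster: c = _KW_INDEX.get(word); if c is not None: counts[c] += 1
def stepB (cs : List Int) (w : String) : List Int :=
  match kwIndex.get? w with
  | some c => PySem.List.pySetD cs c (PySem.List.pyGetD cs c 0 + 1)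
  | none => cs

def bestCluster (headline : String) : Int :=
  let counts : List Int :=
    (PySem.Set.ofList (PySem.Str.split₀ (PySem.Str.lower headline))).foldl stepB [0, 0, 0, 0]
  ((PySem.List.index? counts ((PySem.List.max? counts (fun x => x)).getD 0)).getD 0 : Nat)

def simple_cluster_alt (headlines : List String) (n_clusters : Int) : List Int :=
  headlines.map bestCluster

-- ===== PRECONDITION & SPEC =====
def Spec_simple_cluster (headlines : List String) (n_clusters : Int) (out : List Int) : Prop := out = simple_cluster_alt headlines n_clusters
instance (headlines : List String) (n_clusters : Int) (out : List Int) : Decidable (Spec_simple_cluster headlines n_clusters out) := by unfold Spec_simple_cluster; infer_instance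

-- ===== CLAIM (what is proved, stated in full; the proofs are below) =====
def Claim_equal_simple_cluster : Prop := ∀ (headlines : List String) (n_clusters : Int), Dom_simple_cluster headlines n_clusters → Spec_simple_cluster headlines n_clusters (simple_cluster headlines n_clusters)

-- ===== LEMMAS AND PROOFS =====

-- the keyword membership tests, per cluster
def f0 : String → Bool := fun x => (PySem.Set.ofList ["military","defense","naval","border"]).contains x
def f1 : String → Bool := fun x => (PySem.Set.ofList ["sanction","embargo","trade"]).contains x
def f2 : String → Bool := fun x => (PySem.Set.ofList ["market","economy","equities","price"]).contains x
def f3 : String → Bool := fun x => (PySem.Set.ofList ["diplomatic","talks","agreement"]).contains x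

-- first index (left-to-right, strict improvement over a running best starting at 0,
-- on nonnegative counts) of the maximum of four counts
def spec4 (k0 k1 k2 k3 : Nat) : Int :=
  if k0 ≥ k1 ∧ k0 ≥ k2 ∧ k0 ≥ k3 then 0
  else if k1 ≥ k2 ∧ k1 ≥ k3 then 1
  else if k2 ≥ k3 then 2 else 3

lemma kwIndex_eq : kwIndex = PySem.Dict.mk
    [("military",0),("defense",0),("naval",0),("border",0),
     ("sanction",1),("embargo",1),("trade",1),
     ("market",2),("economy",2),("equities",2),("price",2),
     ("diplomatic",3),("talks",3),("agreement",3)] := by rfl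

lemma kwIndex_get (w : String) :
    kwIndex.get? w =
      if f0 w then some 0
      else if f1 w then some 1
      else if f2 w then some 2
      else if f3 w then some 3
      else none := by
  rw [kwIndex_eq]
  simp only [PySem.Dict.get?_mk_cons, beq_iff_eq]
  by_cases h0 : "military" = w
  · subst h0; decide
  rw [if_neg h0]
  by_cases h1 : "defense" = w
  · subst h1; decide
  rw [if_neg h1]
  by_cases h2 : "naval" = w
  · subst h2; decide
  rw [if_neg h2]
  by_cases h3 : "border" = w
  · subst h3; decide
  rw [if_neg h3]
  by_cases h4 : "sanction" = w
  · subst h4; decide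
  rw [if_neg h4]
  by_cases h5 : "embargo" = w
  · subst h5; decide
  rw [if_neg h5]
  by_cases h6 : "trade" = w
  · subst h6; decide
  rw [if_neg h6]
  by_cases h7 : "market" = w
  · subst h7; decide
  rw [if_neg h7]
  by_cases h8 : "economy" = w
  · subst h8; decide
  rw [if_neg h8]
  by_cases h9 : "equities" = w
  · subst h9; decide
  rw [if_neg h9]
  by_cases h10 : "price" = w
  · subst h10; decide
  rw [if_neg h10]
  by_cases h11 : "diplomatic" = w
  · subst h11; decide
  rw [if_neg h11]
  by_cases h12 : "talks" = w
  · subst h12; decide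
  rw [if_neg h12]
  by_cases h13 : "agreement" = w
  · subst h13; decide
  rw [if_neg h13]
  have n0 : ¬ (f0 w = true) := by
    unfold f0; simp only [PySem.Set.contains_iff, PySem.Set.mem_ofList, List.mem_cons, List.not_mem_nil, or_false]; tauto
  have n1 : ¬ (f1 w = true) := by
    unfold f1; simp only [PySem.Set.contains_iff, PySem.Set.mem_ofList, List.mem_cons, List.not_mem_nil, or_false]; tauto
  have n2 : ¬ (f2 w = true) := by
    unfold f2; simp only [PySem.Set.contains_iff, PySem.Set.mem_ofList, List.mem_cons, List.not_mem_nil, or_false]; tauto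
  have n3 : ¬ (f3 w = true) := by
    unfold f3; simp only [PySem.Set.contains_iff, PySem.Set.mem_ofList, List.mem_cons, List.not_mem_nil, or_false]; tauto
  rw [if_neg n0, if_neg n1, if_neg n2, if_neg n3]
  rfl

lemma stepB_eq (w : String) (a b c d : Int) :
    stepB [a, b, c, d] w =
      if f0 w then [a + 1, b, c, d]
      else if f1 w then [a, b + 1, c, d]
      else if f2 w then [a, b, c + 1, d]
      else if f3 w then [a, b, c, d + 1]
      else [a, b, c, d] := by
  unfold stepB
  rw [kwIndex_get w]
  split_ifs <;> rfl

-- disjointness of the four keyword lists, applied to a word known to be in one of them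
lemma mem0_not (w : String) (h : f0 w = true) : f1 w = false ∧ f2 w = false ∧ f3 w = false := by
  have hw : w = "military" ∨ w = "defense" ∨ w = "naval" ∨ w = "border" := by
    simpa [f0, PySem.Set.contains_iff, PySem.Set.mem_ofList] using h
  rcases hw with h' | h' | h' | h' <;> subst h' <;> decide

lemma mem1_not (w : String) (h : f1 w = true) : f0 w = false ∧ f2 w = false ∧ f3 w = false := by
  have hw : w = "sanction" ∨ w = "embargo" ∨ w = "trade" := by
    simpa [f1, PySem.Set.contains_iff, PySem.Set.mem_ofList] using h
  rcases hw with h' | h' | h' <;> subst h' <;> decide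

lemma mem2_not (w : String) (h : f2 w = true) : f0 w = false ∧ f1 w = false ∧ f3 w = false := by
  have hw : w = "market" ∨ w = "economy" ∨ w = "equities" ∨ w = "price" := by
    simpa [f2, PySem.Set.contains_iff, PySem.Set.mem_ofList] using h
  rcases hw with h' | h' | h' | h' <;> subst h' <;> decide

lemma mem3_not (w : String) (h : f3 w = true) : f0 w = false ∧ f1 w = false ∧ f2 w = false := by
  have hw : w = "diplomatic" ∨ w = "talks" ∨ w = "agreement" := by
    simpa [f3, PySem.Set.contains_iff, PySem.Set.mem_ofList] using h
  rcases hw with h' | h' | h' <;> subst h' <;> decide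

lemma counts_fold (ws : List String) (a b c d : Int) :
    ws.foldl stepB [a, b, c, d]
    = [a + ((ws.filter f0).length : Int), b + ((ws.filter f1).length : Int),
       c + ((ws.filter f2).length : Int), d + ((ws.filter f3).length : Int)] := by
  induction ws generalizing a b c d with
  | nil => simp
  | cons w ws ih =>
    rw [List.foldl_cons, stepB_eq]
    by_cases h0 : f0 w = true
    · obtain ⟨n1, n2, n3⟩ := mem0_not w h0
      rw [if_pos h0, ih]
      simp only [List.filter_cons, h0, n1, n2, n3]
      simp only [List.length_cons, if_true, Bool.false_eq_true, if_false]
      push_cast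
      simp only [List.cons.injEq, and_true]
      omega
    rw [if_neg h0]
    by_cases h1 : f1 w = true
    · obtain ⟨n0, n2, n3⟩ := mem1_not w h1
      rw [if_pos h1, ih]
      simp only [List.filter_cons, h1, n0, n2, n3]
      simp only [List.length_cons, if_true, Bool.false_eq_true, if_false]
      push_cast
      simp only [List.cons.injEq, and_true, true_and]
      omega
    rw [if_neg h1]
    by_cases h2 : f2 w = true
    · obtain ⟨n0, n1, n3⟩ := mem2_not w h2
      rw [if_pos h2, ih]
      simp only [List.filter_cons, h2, n0, n1, n3]
      simp only [List.length_cons, if_true, Bool.false_eq_true, if_false]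
      push_cast
      simp only [List.cons.injEq, and_true, true_and]
      omega
    rw [if_neg h2]
    by_cases h3 : f3 w = true
    · obtain ⟨n0, n1, n2⟩ := mem3_not w h3
      rw [if_pos h3, ih]
      simp only [List.filter_cons, h3, n0, n1, n2]
      simp only [List.length_cons, if_true, Bool.false_eq_true, if_false]
      push_cast
      simp only [List.cons.injEq, and_true, true_and]
      omega
    rw [if_neg h3, ih]
    simp only [Bool.not_eq_true] at h0 h1 h2 h3
    simp [h0, h1, h2, h3]

lemma foldl_opt_max (f : Option Int → Int → Option Int)
    (hf0 : ∀ x, f none x = some x)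
    (hf : ∀ m x, f (some m) x = if m < x then some x else some m) :
    ∀ (x : Int) (xs : List Int), (x::xs).foldl f none = some (xs.foldl (fun a b => max a b) x) := by
  have key : ∀ (xs : List Int) (m : Int), xs.foldl f (some m) = some (xs.foldl (fun a b => max a b) m) := by
    intro xs
    induction xs with
    | nil => intro m; rfl
    | cons y ys ih =>
      intro m
      simp only [List.foldl, hf]
      rcases lt_or_ge m y with h | h
      · rw [if_pos h, ih, max_eq_right h.le]
      · rw [if_neg (not_lt.2 h), ih, max_eq_left h]
  intro x xs
  simp only [List.foldl, hf0]
  exact key xs x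

lemma max?_cons (x : Int) (xs : List Int) :
    PySem.List.max? (x::xs) (fun y => y) = some (xs.foldl (fun a b => max a b) x) := by
  simp only [PySem.List.max?]
  exact foldl_opt_max _ (fun _ => rfl) (fun _ _ => rfl) x xs

lemma b_side (k0 k1 k2 k3 : Nat) :
    ((PySem.List.index? [(k0:Int),k1,k2,k3] ((PySem.List.max? [(k0:Int),k1,k2,k3] (fun x => x)).getD 0)).getD 0 : Nat)
    = spec4 k0 k1 k2 k3 := by
  unfold spec4
  rw [max?_cons]
  simp only [List.foldl, Option.getD_some, PySem.List.index?_eq_idxOf?, List.idxOf?,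
    List.findIdx?, List.findIdx?.go, beq_iff_eq]
  split_ifs <;> simp only [Option.getD_some, Option.getD_none] <;> omega

lemma a_inner (ws : List String) :
    ((PySem.List.enumerate clustersA 0).foldl
      (fun (st : Int × Int) e =>
        let m := PySem.Set.len (PySem.Set.inter ws e.2)
        if m > st.2 then (e.1, m) else st)
      ((0 : Int), (0 : Int))).1
    = spec4 (ws.filter (fun x => (PySem.Set.ofList ["military","defense","naval","border"]).contains x)).length
        (ws.filter (fun x => (PySem.Set.ofList ["sanction","embargo","trade"]).contains x)).length
        (ws.filter (fun x => (PySem.Set.ofList ["market","economy","equities","price"]).contains x)).length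
        (ws.filter (fun x => (PySem.Set.ofList ["diplomatic","talks","agreement"]).contains x)).length := by
  unfold spec4
  simp only [clustersA, PySem.List.enumerate, List.foldl, PySem.Set.len, PySem.Set.inter]
  split_ifs <;> dsimp only <;> omega

lemma best_eq (h : String) :
    ((PySem.List.enumerate clustersA 0).foldl
      (fun (st : Int × Int) e =>
        let m := PySem.Set.len (PySem.Set.inter (PySem.Set.ofList (PySem.Str.split₀ (PySem.Str.lower h))) e.2)
        if m > st.2 then (e.1, m) else st)
      ((0 : Int), (0 : Int))).1
    = bestCluster h := by
  unfold bestCluster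
  rw [a_inner, counts_fold]
  simp only [zero_add]
  rw [b_side]
  rfl

-- ===== VERDICT (by name: the statement is the Claim_ definition above) =====
theorem simple_cluster_spec : Claim_equal_simple_cluster := by
  intro headlines n_clusters _
  unfold Spec_simple_cluster simple_cluster simple_cluster_alt
  by_cases hnil : headlines = []
  · subst hnil; rfl
  rw [if_neg hnil]
  rw [PySem.List.foldl_append_singleton_eq_map, PySem.List.foldl_append_singleton_eq_map]
  simp only [List.nil_append, List.map_map]
  refine List.map_congr_left ?_
  intro h _
  exact best_eq h
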